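-- pv_equiv track=rewrite | github.com/divyashan/sec_scrape | utils.py | get_multiplier_from_tbl_list
-- ===== SOURCE A (Python) =====
-- def get_multiplier_from_tbl_list(table_list):
--     table_string = ' '.join([' '.join(row) for row in table_list])
--     if 'thousands' in table_string:
--         return 1000
--     elif 'millions' in table_string:
--         return 1000000
--     elif 'billions' in table_string:
--         return 1000000
--     return 1
-- ===== SOURCE B (Python) =====
-- def get_multiplier_from_tbl_list(table_list):
--     th = mi = bi = False
--     for row in table_list:
--         for cell in row:
--             th = th or ('thousands' in cell)
--             mi = mi or ('millions' in cell)
--             bi = bi or ('billions' in cell)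
--     if th:
--         return 1000
--     if mi or bi:
--         return 1000000
--     return 1
-- ===== Notes on version B (the rewrite author's own statement) =====
-- stated objective: alternative
-- what changed: Instead of building one big space-joined string and scanning it three times, B makes a single pass over the cells maintaining three seen-flags (per-cell membership tests are equivalent because no keyword contains a space), resolving the thousands-beats-millions priority only after the pass.
import Mathlib
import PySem

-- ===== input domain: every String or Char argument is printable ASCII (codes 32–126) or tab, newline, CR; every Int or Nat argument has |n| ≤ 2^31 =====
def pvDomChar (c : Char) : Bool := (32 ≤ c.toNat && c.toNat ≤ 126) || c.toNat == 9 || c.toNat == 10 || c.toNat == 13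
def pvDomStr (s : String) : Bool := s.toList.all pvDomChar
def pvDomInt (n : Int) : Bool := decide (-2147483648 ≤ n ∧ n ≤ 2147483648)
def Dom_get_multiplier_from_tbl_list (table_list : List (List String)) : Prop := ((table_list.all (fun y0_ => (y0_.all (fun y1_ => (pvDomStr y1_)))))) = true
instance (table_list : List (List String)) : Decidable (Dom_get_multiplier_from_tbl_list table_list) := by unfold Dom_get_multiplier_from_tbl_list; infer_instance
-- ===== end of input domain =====

-- B replaces the big space-joined string and three scans of it by ONE pass over the cells
-- keeping three seen-flags, deciding the thousands-beats-millions priority after the pass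
-- (per-cell tests are equivalent because no keyword contains a space). Objective: alternative.

-- ===== PORT A =====
def get_multiplier_from_tbl_list (table_list : List (List String)) : Int :=
  let table_string := PySem.Str.join " " (table_list.map (fun row => PySem.Str.join " " row))
  if PySem.Str.isIn "thousands" table_string then 1000
  else if PySem.Str.isIn "millions" table_string then 1000000
  else if PySem.Str.isIn "billions" table_string then 1000000
  else 1

-- ===== PORT B =====
def get_multiplier_from_tbl_list_alt (table_list : List (List String)) : Int :=
  let st := table_list.foldl (fun acc row =>
    row.foldl (fun (acc : Bool × Bool × Bool) cell =>
      (acc.1 || PySem.Str.isIn "thousands" cell,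
       acc.2.1 || PySem.Str.isIn "millions" cell,
       acc.2.2 || PySem.Str.isIn "billions" cell)) acc) (false, false, false)
  if st.1 then 1000
  else if st.2.1 || st.2.2 then 1000000
  else 1

-- ===== PRECONDITION & SPEC =====
def Spec_get_multiplier_from_tbl_list (table_list : List (List String)) (out : Int) : Prop := out = get_multiplier_from_tbl_list_alt table_list
instance (table_list : List (List String)) (out : Int) : Decidable (Spec_get_multiplier_from_tbl_list table_list out) := by unfold Spec_get_multiplier_from_tbl_list; infer_instance

-- ===== CLAIM (what is proved, stated in full; the proofs are below) =====
def Claim_equal_get_multiplier_from_tbl_list : Prop := ∀ (table_list : List (List String)), Dom_get_multiplier_from_tbl_list table_list → Spec_get_multiplier_from_tbl_list table_list (get_multiplier_from_tbl_list table_list)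

-- ===== LEMMAS AND PROOFS =====

-- a ' '-free word that is a prefix of x ++ ' ' :: y is a prefix of x
theorem pvPrefixSplit (y : List Char) : ∀ (w x : List Char), ' ' ∉ w → w <+: x ++ ' ' :: y → w <+: x
  | [], _, _, _ => List.nil_prefix
  | d :: w', [], hw, h => by
      simp only [List.nil_append, List.cons_prefix_cons] at h
      exact absurd (h.1 ▸ List.mem_cons_self) hw
  | d :: w', e :: x', hw, h => by
      simp only [List.cons_append, List.cons_prefix_cons] at h ⊢
      exact ⟨h.1, pvPrefixSplit y w' x' (fun hm => hw (List.mem_cons_of_mem _ hm)) h.2⟩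

theorem pvInfixSplit (w a b : List Char) (hw : ' ' ∉ w) (hne : w ≠ []) :
    w <:+: a ++ ' ' :: b ↔ w <:+: a ∨ w <:+: b := by
  induction a with
  | nil =>
    simp only [List.nil_append, List.infix_cons_iff]
    constructor
    · rintro (hp | hi)
      · cases w with
        | nil => exact absurd rfl hne
        | cons d w' =>
          rw [List.cons_prefix_cons] at hp
          exact absurd (hp.1 ▸ List.mem_cons_self) hw
      · exact Or.inr hi
    · rintro (hi | hi)
      · exact absurd (List.eq_nil_of_infix_nil hi) hne
      · exact Or.inr hi
  | cons c a' ih =>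
    rw [List.cons_append, List.infix_cons_iff, ih, List.infix_cons_iff]
    constructor
    · rintro (hp | hi | hi)
      · cases w with
        | nil => exact absurd rfl hne
        | cons d w' =>
          rw [List.cons_prefix_cons] at hp
          have : (d :: w') <+: c :: a' := by
            rw [List.cons_prefix_cons]
            exact ⟨hp.1, pvPrefixSplit b w' a' (fun hm => hw (List.mem_cons_of_mem _ hm)) hp.2⟩
          exact Or.inl (Or.inl this)
      · exact Or.inl (Or.inr hi)
      · exact Or.inr hi
    · rintro ((hp | hi) | hi)
      · exact Or.inl (hp.trans (List.prefix_append _ _))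
      · exact Or.inr (Or.inl hi)
      · exact Or.inr (Or.inr hi)

theorem pvInfixJoin (w : List Char) (hw : ' ' ∉ w) (hne : w ≠ []) (parts : List (List Char)) :
    w <:+: PySem.Chars.join [' '] parts ↔ ∃ p ∈ parts, w <:+: p := by
  induction parts with
  | nil =>
    simp only [PySem.Chars.join_nil, List.not_mem_nil]
    constructor
    · intro h; exact absurd (List.eq_nil_of_infix_nil h) hne
    · rintro ⟨p, hp, _⟩; exact absurd hp (by simp)
  | cons a rest ih =>
    cases rest with
    | nil =>
      simp [PySem.Chars.join_singleton]
    | cons b rest' =>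
      rw [PySem.Chars.join_cons_cons]
      have : a ++ [' '] ++ PySem.Chars.join [' '] (b :: rest') =
          a ++ ' ' :: PySem.Chars.join [' '] (b :: rest') := by simp
      rw [this, pvInfixSplit w a _ hw hne, ih]
      constructor
      · rintro (h | ⟨p, hp, h⟩)
        · exact ⟨a, List.mem_cons_self, h⟩
        · exact ⟨p, List.mem_cons_of_mem _ hp, h⟩
      · rintro ⟨p, hp, h⟩
        rcases List.mem_cons.1 hp with rfl | hp
        · exact Or.inl h
        · exact Or.inr ⟨p, hp, h⟩

-- A's membership test on the joined string = "some cell contains the keyword"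
theorem pvIsInJoined (w : String) (hw : ' ' ∉ w.toList) (hne : w.toList ≠ [])
    (table_list : List (List String)) :
    PySem.Str.isIn w (PySem.Str.join " " (table_list.map (fun row => PySem.Str.join " " row)))
      = table_list.any (fun row => row.any (fun cell => PySem.Str.isIn w cell)) := by
  rw [Bool.eq_iff_iff, PySem.Str.isIn_iff_infix, List.any_eq_true]
  rw [PySem.Str.toList_join]
  have hsep : (" " : String).toList = [' '] := rfl
  rw [hsep]
  rw [pvInfixJoin w.toList hw hne]
  constructor
  · rintro ⟨p, hp, h⟩
    simp only [List.map_map, List.mem_map] at hp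
    obtain ⟨row, hrow, rfl⟩ := hp
    rw [show (String.toList ∘ fun row => PySem.Str.join " " row) row
        = PySem.Chars.join [' '] (row.map String.toList) from by
      simp [PySem.Str.toList_join, hsep]] at h
    rw [pvInfixJoin w.toList hw hne] at h
    obtain ⟨c, hc, hcc⟩ := h
    rw [List.mem_map] at hc
    obtain ⟨cell, hcell, rfl⟩ := hc
    refine ⟨row, hrow, ?_⟩
    rw [List.any_eq_true]
    exact ⟨cell, hcell, (PySem.Str.isIn_iff_infix _ _).2 hcc⟩
  · rintro ⟨row, hrow, h⟩
    rw [List.any_eq_true] at h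
    obtain ⟨cell, hcell, hc⟩ := h
    refine ⟨PySem.Chars.join [' '] (row.map String.toList), ?_, ?_⟩
    · simp only [List.map_map, List.mem_map]
      exact ⟨row, hrow, by simp [PySem.Str.toList_join, hsep]⟩
    · rw [pvInfixJoin w.toList hw hne]
      exact ⟨cell.toList, List.mem_map_of_mem hcell, (PySem.Str.isIn_iff_infix _ _).1 hc⟩

-- B's inner fold accumulates or-of-membership over the row
theorem pvRowFold (row : List String) (acc : Bool × Bool × Bool) :
    row.foldl (fun (acc : Bool × Bool × Bool) cell =>
      (acc.1 || PySem.Str.isIn "thousands" cell,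
       acc.2.1 || PySem.Str.isIn "millions" cell,
       acc.2.2 || PySem.Str.isIn "billions" cell)) acc
    = (acc.1 || row.any (fun c => PySem.Str.isIn "thousands" c),
       acc.2.1 || row.any (fun c => PySem.Str.isIn "millions" c),
       acc.2.2 || row.any (fun c => PySem.Str.isIn "billions" c)) := by
  induction row generalizing acc with
  | nil => simp
  | cons c cs ih => rw [List.foldl_cons, ih]; simp [Bool.or_assoc]

theorem pvTblFold (tl : List (List String)) (acc : Bool × Bool × Bool) :
    tl.foldl (fun acc row =>
      row.foldl (fun (acc : Bool × Bool × Bool) cell =>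
        (acc.1 || PySem.Str.isIn "thousands" cell,
         acc.2.1 || PySem.Str.isIn "millions" cell,
         acc.2.2 || PySem.Str.isIn "billions" cell)) acc) acc
    = (acc.1 || tl.any (fun r => r.any (fun c => PySem.Str.isIn "thousands" c)),
       acc.2.1 || tl.any (fun r => r.any (fun c => PySem.Str.isIn "millions" c)),
       acc.2.2 || tl.any (fun r => r.any (fun c => PySem.Str.isIn "billions" c))) := by
  induction tl generalizing acc with
  | nil => simp
  | cons r rs ih => rw [List.foldl_cons, pvRowFold, ih]; simp [Bool.or_assoc]

-- ===== VERDICT (by name: the statement is the Claim_ definition above) =====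
theorem get_multiplier_from_tbl_list_spec : Claim_equal_get_multiplier_from_tbl_list := by
  intro table_list _
  unfold Spec_get_multiplier_from_tbl_list get_multiplier_from_tbl_list get_multiplier_from_tbl_list_alt
  simp only [pvTblFold, pvIsInJoined "thousands" (by decide) (by decide),
    pvIsInJoined "millions" (by decide) (by decide),
    pvIsInJoined "billions" (by decide) (by decide)]
  simp only [Bool.false_or, Bool.or_eq_true, List.any_eq_true]
  split_ifs with h1 h2 h3 h4 h5 h6 <;> try rfl
  · exact absurd (Or.inl h2) h3
  · exact absurd (Or.inr h4) h5
  · rcases h6 with h | h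
    · exact absurd h h2
    · exact absurd h h4
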